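-- pv_equiv track=rewrite | github.com/SeungYupYum/Personal-Project | Web Crawler & Search Engine/Search Engine/Search-Server/dataProcessor.py | findWordIndices
-- ===== SOURCE A (Python) =====
-- def findWordIndices(words_list, indices_dict):
--     # distinct_words_list = list(set(words_list))
--
--     for word in words_list:
--         occurrences = []
--         for index, value in enumerate(words_list):
--             if value == word:
--                 occurrences.append(index)
--         indices_dict[word] = occurrences
--     return indices_dict
-- ===== SOURCE B (Python) =====
-- def findWordIndices(words_list, indices_dict):
--     # One pass: group indices by word, then assign each distinct word once.
--     pairs = [(value, index) for index, value in enumerate(words_list)]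
--     occ = {}
--     for word, index in pairs:
--         occ.setdefault(word, []).append(index)
--     for word, idxs in occ.items():
--         indices_dict[word] = idxs
--     return indices_dict
-- ===== Notes on version B (the rewrite author's own statement) =====
-- stated objective: faster
-- what changed: A rescans the whole list for every word (quadratic); B makes one pass grouping indices into a dict with setdefault and then assigns each distinct word once.
import Mathlib
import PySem

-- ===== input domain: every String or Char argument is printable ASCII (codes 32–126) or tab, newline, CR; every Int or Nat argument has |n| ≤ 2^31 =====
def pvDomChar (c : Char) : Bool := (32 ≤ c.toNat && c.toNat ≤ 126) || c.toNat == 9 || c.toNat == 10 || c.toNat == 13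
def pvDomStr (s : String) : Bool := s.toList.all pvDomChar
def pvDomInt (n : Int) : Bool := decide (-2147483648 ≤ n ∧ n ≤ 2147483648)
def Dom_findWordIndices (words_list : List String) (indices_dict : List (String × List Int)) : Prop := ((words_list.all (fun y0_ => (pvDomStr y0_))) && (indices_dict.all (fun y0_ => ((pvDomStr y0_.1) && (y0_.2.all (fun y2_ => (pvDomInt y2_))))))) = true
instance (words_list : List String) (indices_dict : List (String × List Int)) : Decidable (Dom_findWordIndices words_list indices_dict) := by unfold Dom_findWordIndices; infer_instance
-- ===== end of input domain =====

-- B replaces A's per-word rescan of the whole list (quadratic) by one grouping pass plus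
-- one assignment per distinct word (objective: faster).
-- A mutates indices_dict in place and returns it; the equivalence proved is about the return value.

-- ===== PORT A =====
def findWordIndices (words_list : List String) (indices_dict : List (String × List Int)) : List (String × List Int) :=
  (words_list.foldl (fun d word =>
      let occurrences : List Int :=
        (PySem.List.enumerate words_list 0).foldl
          (fun occ p => if p.2 == word then occ ++ [p.1] else occ) []
      d.insert word occurrences)
    (PySem.Dict.mk indices_dict)).items

-- ===== PORT B =====
def findWordIndices_alt (words_list : List String) (indices_dict : List (String × List Int)) : List (String × List Int) :=
  let pairs := (PySem.List.enumerate words_list 0).map (fun p => (p.2, p.1))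
  let occ := pairs.foldl (fun d q => d.modify q.1 [] (· ++ [q.2])) PySem.Dict.empty
  (occ.items.foldl (fun d q => d.insert q.1 q.2) (PySem.Dict.mk indices_dict)).items

-- ===== PRECONDITION & SPEC =====
def Spec_findWordIndices (words_list : List String) (indices_dict : List (String × List Int)) (out : List (String × List Int)) : Prop := out = findWordIndices_alt words_list indices_dict
instance (words_list : List String) (indices_dict : List (String × List Int)) (out : List (String × List Int)) : Decidable (Spec_findWordIndices words_list indices_dict out) := by unfold Spec_findWordIndices; infer_instance

-- ===== CLAIM (what is proved, stated in full; the proofs are below) =====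
def Claim_equal_findWordIndices : Prop := ∀ (words_list : List String) (indices_dict : List (String × List Int)), Dom_findWordIndices words_list indices_dict → Spec_findWordIndices words_list indices_dict (findWordIndices words_list indices_dict)

-- ===== LEMMAS AND PROOFS =====

def pvOcc (ws : List String) (w : String) : List Int :=
  ((PySem.List.enumerate ws 0).filter (fun p => p.2 == w)).map (·.1)
def pvInv (k : String) (v : List Int) (d : PySem.Dict String (List Int)) : Prop :=
  d.contains k = true ∧ ∀ p ∈ d.items, p.1 = k → p.2 = v

theorem pvInsert_of_inv (k : String) (v : List Int) (d : PySem.Dict String (List Int))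
    (h : pvInv k v d) : d.insert k v = d := by
  obtain ⟨hc, hv⟩ := h
  apply PySem.Dict.ext
  rw [PySem.Dict.items_insert_of_contains d v hc]
  have hcongr : ∀ p ∈ d.items, (if (p.1 == k) = true then (k, v) else p) = p := by
    intro p hp
    by_cases h1 : p.1 = k
    · have h2 := hv p hp h1
      cases p with
      | mk a b => simp only at h1 h2; subst h1; subst h2; simp
    · simp [h1]
  rw [List.map_congr_left hcongr]; simp

theorem pvInv_insert_self (k : String) (v : List Int) (d : PySem.Dict String (List Int)) :
    pvInv k v (d.insert k v) := by
  constructor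
  · simp
  · intro p hp h1
    rcases (PySem.Dict.mem_items_insert d k v p).1 hp with h | h
    · simp [h]
    · exact absurd h1 h.2

theorem pvInv_insert_other (k : String) (v : List Int) (d : PySem.Dict String (List Int))
    (k' : String) (v' : List Int) (h : pvInv k v d) (hk : k' = k → v' = v) :
    pvInv k v (d.insert k' v') := by
  constructor
  · simp [PySem.Dict.contains_insert, h.1]
  · intro p hp h1
    rcases (PySem.Dict.mem_items_insert d k' v' p).1 hp with h2 | h2
    · have : k' = k := by rw [h2] at h1; exact h1
      rw [h2]; exact hk this
    · exact h.2 p h2.1 h1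

theorem pvInv_foldl (ws0 : List String) (ws : List String) (x : String)
    (d : PySem.Dict String (List Int)) (h : pvInv x (pvOcc ws0 x) d) :
    pvInv x (pvOcc ws0 x) (ws.foldl (fun d w => d.insert w (pvOcc ws0 w)) d) := by
  induction ws generalizing d with
  | nil => exact h
  | cons y ys ih =>
    exact ih _ (pvInv_insert_other _ _ _ _ _ h (fun he => by rw [he]))

theorem pvInv_mem (ws0 : List String) (ws : List String) (x : String)
    (d : PySem.Dict String (List Int)) (hx : x ∈ ws) :
    pvInv x (pvOcc ws0 x) (ws.foldl (fun d w => d.insert w (pvOcc ws0 w)) d) := by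
  induction ws generalizing d with
  | nil => cases hx
  | cons y ys ih =>
    rcases List.mem_cons.1 hx with h | h
    · subst h
      exact pvInv_foldl ws0 ys x _ (pvInv_insert_self _ _ _)
    · exact ih _ h

theorem pvFold_dedup (ws0 : List String) (ws : List String) (d : PySem.Dict String (List Int)) :
    ws.foldl (fun d w => d.insert w (pvOcc ws0 w)) d
      = (PySem.Set.ofList ws).foldl (fun d w => d.insert w (pvOcc ws0 w)) d := by
  induction ws using List.reverseRecOn with
  | nil => rfl
  | append_singleton xs x ih =>
    rw [List.foldl_append, PySem.Set.ofList_append_singleton, PySem.Set.add_eq_ite]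
    by_cases hx : x ∈ PySem.Set.ofList xs
    · rw [if_pos hx, ← ih]
      exact pvInsert_of_inv _ _ _ (pvInv_mem ws0 xs x d ((PySem.Set.mem_ofList xs x).1 hx))
    · rw [if_neg hx, List.foldl_append, ← ih]


theorem pvAltEq (ws : List String) (d0 : List (String × List Int)) :
    findWordIndices_alt ws d0
      = ((PySem.Set.ofList ws).foldl (fun d w => d.insert w (pvOcc ws w)) (PySem.Dict.mk d0)).items := by
  unfold findWordIndices_alt
  show ((((PySem.List.enumerate ws 0).map (fun p => (p.2, p.1))).foldl
          (fun d q => d.modify q.1 [] (· ++ [q.2])) PySem.Dict.empty).items.foldl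
        (fun d q => d.insert q.1 q.2) (PySem.Dict.mk d0)).items = _
  set pairs := (PySem.List.enumerate ws 0).map (fun p => (p.2, p.1)) with hpairs
  set occ := pairs.foldl (fun d q => d.modify q.1 [] (· ++ [q.2])) PySem.Dict.empty with hocc
  have hkeys : occ.keys = PySem.Set.ofList ws := by
    rw [hocc, PySem.Dict.keys_foldl_modify_key pairs (fun q => q.1) [] (fun _ q => (· ++ [q.2]))]
    have : pairs.map (fun q => q.1) = ws := by
      rw [hpairs, List.map_map]
      exact PySem.List.map_snd_enumerate ws 0
    rw [this]
    simp [PySem.Set.update_nil_left, PySem.Dict.keys_empty]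
  have hnodup : occ.keys.Nodup := by
    rw [hkeys]; exact PySem.Set.nodup_ofList ws
  have hgetD : ∀ k, occ.getD k [] = pvOcc ws k := by
    intro k
    rw [hocc, PySem.Dict.getD_foldl_modify_append pairs PySem.Dict.empty k]
    rw [hpairs, List.filter_map, List.map_map]
    simp [pvOcc, PySem.Dict.getD_empty, Function.comp_def]
  have hitems : occ.items = (PySem.Set.ofList ws).map (fun k => (k, pvOcc ws k)) := by
    rw [PySem.Dict.items_eq_map_keys occ hnodup [], hkeys]
    exact List.map_congr_left (fun k _ => by rw [hgetD k])
  rw [hitems, List.foldl_map]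

theorem pvMain (ws : List String) (d0 : List (String × List Int)) :
    findWordIndices ws d0 = findWordIndices_alt ws d0 := by
  rw [pvAltEq]
  unfold findWordIndices
  have hA : (fun (d : PySem.Dict String (List Int)) word =>
      let occurrences : List Int :=
        (PySem.List.enumerate ws 0).foldl
          (fun occ p => if p.2 == word then occ ++ [p.1] else occ) []
      d.insert word occurrences)
      = fun d w => d.insert w (pvOcc ws w) := by
    funext d w
    show d.insert w ((PySem.List.enumerate ws 0).foldl
          (fun occ p => if p.2 == w then occ ++ [p.1] else occ) []) = _
    rw [PySem.List.foldl_append_if (fun p : Int × String => p.2 == w) (fun p : Int × String => p.1) (PySem.List.enumerate ws 0) []]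
    simp [pvOcc]
  rw [hA]
  exact congrArg _ (pvFold_dedup ws ws (PySem.Dict.mk d0))

-- ===== VERDICT (by name: the statement is the Claim_ definition above) =====
theorem findWordIndices_spec : Claim_equal_findWordIndices := by
  intro ws d0 _
  unfold Spec_findWordIndices
  exact pvMain ws d0
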